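-- pv_equiv track=rewrite | github.com/terrycojones/modulus | modulus.py | mods
-- ===== SOURCE A (Python) =====
-- def mods(base, places=None):
--     """
--     Generate 10^x mod C{base} for increasing values of x.
--
--     @param n: An C{int} base for the modulus operation.
--     @param places: The C{int} number of places (1, 10, 100, etc.) to generate
--         the modulus for. If C{None} there is no limit.
--     @return: A generator yielding 10^x mod C{base} for increasing values of x.
--     """
--     place = 0
--     x = 1
--     while places is None or place < places:
--         place += 1
--         if base > x:
--             yield x
--         else:
--             yield x % base
--         x *= 10
-- ===== SOURCE B (Python) =====
-- def _pow10_mod(e, base):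
--     # 10**e reduced modulo base by square-and-multiply, reducing with % base
--     # at every step (so base == 0 raises ZeroDivisionError like plain %).
--     result = 1 % base
--     b = 10 % base
--     while e:
--         if e & 1:
--             result = result * b % base
--         b = b * b % base
--         e >>= 1
--     return result
--
--
-- def mods(base, places=None):
--     e = 0
--     while places is None or e < places:
--         yield _pow10_mod(e, base)
--         e += 1
-- ===== Notes on version B (the rewrite author's own statement) =====
-- stated objective: alternative
-- what changed: Instead of carrying the ever-growing running power x (x *= 10 each step, with a branch on base > x), B computes each term independently as 10^e mod base by square-and-multiply, reducing with % base at every step so intermediates stay bounded.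
import Mathlib
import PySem

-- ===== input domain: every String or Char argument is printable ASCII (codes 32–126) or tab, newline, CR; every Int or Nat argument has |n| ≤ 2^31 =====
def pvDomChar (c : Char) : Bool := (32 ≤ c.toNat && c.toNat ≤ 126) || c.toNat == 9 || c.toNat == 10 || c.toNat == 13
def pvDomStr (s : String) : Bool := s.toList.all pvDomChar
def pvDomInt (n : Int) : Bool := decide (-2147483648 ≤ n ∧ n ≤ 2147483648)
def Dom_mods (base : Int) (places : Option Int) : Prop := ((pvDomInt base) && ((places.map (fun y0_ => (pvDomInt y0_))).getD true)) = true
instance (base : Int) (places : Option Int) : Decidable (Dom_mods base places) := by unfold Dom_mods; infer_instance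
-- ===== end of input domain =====

-- B replaces A's running power x (x *= 10 each step) by an independent
-- square-and-multiply computation of 10^e mod base per term; the equivalence is
-- about the finite list of yielded values (Pre_ excludes places = None, where the
-- generator is infinite, and base = 0 with places ≥ 1, where both raise ZeroDivisionError).

-- ===== PORT A =====
def modsLoopA (base x : Int) (k : Nat) : List Int :=
  match k with
  | 0 => []
  | Nat.succ k => (if base > x then x else PySem.Int.mod x base) :: modsLoopA base (x * 10) k

def mods (base : Int) (places : Option Int) : List Int :=
  match places with
  | none => []          -- places = None: infinite generator; excluded by Pre_mods
  | some n => modsLoopA base 1 n.toNat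

-- ===== PORT B =====
def pow10ModLoop (base result b : Int) (e : Nat) : Int :=
  if h : e = 0 then result
  else pow10ModLoop base
         (if e % 2 = 1 then PySem.Int.mod (result * b) base else result)
         (PySem.Int.mod (b * b) base) (e / 2)
termination_by e
decreasing_by exact Nat.div_lt_self (Nat.pos_of_ne_zero h) (by omega)

def pow10Mod (e : Nat) (base : Int) : Int :=
  pow10ModLoop base (PySem.Int.mod 1 base) (PySem.Int.mod 10 base) e

def mods_alt (base : Int) (places : Option Int) : List Int :=
  match places with
  | none => []          -- places = None: infinite generator; excluded by Pre_mods
  | some n => (List.range n.toNat).map (fun e => pow10Mod e base)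

-- ===== PRECONDITION & SPEC =====
-- Pre_ excludes places = None (the generator never terminates, so A returns no list)
-- and base = 0 with places > 0 (the first `%` raises ZeroDivisionError in both).
def Pre_mods (base : Int) (places : Option Int) : Prop :=
  places.isSome = true ∧ (base ≠ 0 ∨ places.getD 0 ≤ 0)
instance (base : Int) (places : Option Int) : Decidable (Pre_mods base places) := by
  unfold Pre_mods; infer_instance

def pvWitness_mods : Int × Option Int := (7, some 5)

def Spec_mods (base : Int) (places : Option Int) (out : List Int) : Prop := out = mods_alt base places
instance (base : Int) (places : Option Int) (out : List Int) : Decidable (Spec_mods base places out) := by unfold Spec_mods; infer_instance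

-- ===== CLAIM (what is proved, stated in full; the proofs are below) =====
def Claim_equal_mods : Prop := ∀ (base : Int) (places : Option Int), Dom_mods base places → Pre_mods base places → Spec_mods base places (mods base places)

-- ===== LEMMAS AND PROOFS =====

theorem pysem_mod_eq_fmod (a b : Int) : PySem.Int.mod a b = Int.fmod a b := rfl

-- 10^e stays positive and fmod is identity below a positive modulus
theorem fmod_eq_self_of_lt {x b : Int} (hx : 0 ≤ x) (hxb : x < b) : Int.fmod x b = x := by
  have hb : 0 ≤ b := le_of_lt (lt_of_le_of_lt hx hxb)
  rw [Int.fmod_eq_emod]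
  simp [hb, Int.emod_eq_of_lt hx hxb]

-- congruence of fmod under replacing a factor by its residue
theorem fmod_mul_left_cong (n x y z : Int) (h : Int.fmod x n = Int.fmod y n) :
    Int.fmod (x * z) n = Int.fmod (y * z) n := by
  rw [Int.mul_fmod x z, Int.mul_fmod y z, h]

theorem fmod_mul_right_cong (n x y z : Int) (h : Int.fmod x n = Int.fmod y n) :
    Int.fmod (z * x) n = Int.fmod (z * y) n := by
  rw [Int.mul_fmod z x, Int.mul_fmod z y, h]

theorem fmod_pow_cong (n x : Int) (k : Nat) :
    Int.fmod ((Int.fmod x n) ^ k) n = Int.fmod (x ^ k) n := by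
  induction k with
  | zero => simp
  | succ k ih =>
    rw [pow_succ, pow_succ, Int.mul_fmod _ (Int.fmod x n), ih,
        Int.fmod_fmod_of_dvd _ dvd_rfl, ← Int.mul_fmod]

theorem fmod_idem (x n : Int) : Int.fmod (Int.fmod x n) n = Int.fmod x n :=
  Int.fmod_fmod_of_dvd _ dvd_rfl

-- characterisation of B's inner loop
theorem pow10ModLoop_eq (base : Int) (e : Nat) : ∀ (r b : Int),
    Int.fmod r base = r → pow10ModLoop base r b e = Int.fmod (r * b ^ e) base := by
  induction e using Nat.strong_induction_on with
  | _ e ih =>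
    intro r b hr
    by_cases h0 : e = 0
    · subst h0
      rw [pow10ModLoop]
      simp [hr]
    · rw [pow10ModLoop]
      simp only [h0, dite_false]
      have hlt : e / 2 < e := Nat.div_lt_self (Nat.pos_of_ne_zero h0) (by omega)
      set r' : Int := if e % 2 = 1 then PySem.Int.mod (r * b) base else r with hr'
      have hr'fix : Int.fmod r' base = r' := by
        rw [hr']; split
        · exact fmod_idem _ _
        · exact hr
      rw [ih (e / 2) hlt r' _ hr'fix]
      have hb2 : Int.fmod (r' * (PySem.Int.mod (b * b) base) ^ (e / 2)) base
          = Int.fmod (r' * (b * b) ^ (e / 2)) base := by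
        apply fmod_mul_right_cong
        rw [pysem_mod_eq_fmod]
        exact fmod_pow_cong base (b * b) (e / 2)
      rw [hb2, hr']
      rcases Nat.even_or_odd e with he | he
      · have h2 : e % 2 = 0 := Nat.even_iff.mp he
        have hee : 2 * (e / 2) = e := by omega
        have hbb : (b * b) ^ (e / 2) = b ^ e := by
          rw [← pow_two, ← pow_mul, hee]
        simp only [h2]
        norm_num
        rw [hbb]
      · have h2 : e % 2 = 1 := Nat.odd_iff.mp he
        have hee : 2 * (e / 2) + 1 = e := by omega
        simp only [h2, if_true, pysem_mod_eq_fmod]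
        rw [fmod_mul_left_cong base _ (r * b) _ (fmod_idem _ _)]
        congr 1
        obtain ⟨m, rfl⟩ : ∃ m, e = 2 * m + 1 := ⟨e / 2, hee.symm⟩
        have hm : (2 * m + 1) / 2 = m := by omega
        rw [hm]
        ring

-- each term of B is 10^e mod base
theorem pow10Mod_eq (e : Nat) (base : Int) :
    pow10Mod e base = Int.fmod (10 ^ e) base := by
  rw [pow10Mod, pysem_mod_eq_fmod, pysem_mod_eq_fmod,
      pow10ModLoop_eq base e _ _ (fmod_idem 1 base),
      fmod_mul_left_cong base (Int.fmod 1 base) 1 _ (fmod_idem 1 base),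
      one_mul, fmod_pow_cong]

-- each term of A is 10^e mod base as well (x = 10^j > 0)
theorem modsLoopA_eq (base : Int) (k : Nat) : ∀ (x : Int), 0 < x →
    modsLoopA base x k = (List.range k).map (fun i => Int.fmod (x * 10 ^ i) base) := by
  induction k with
  | zero => intro x _; simp [modsLoopA]
  | succ k ih =>
    intro x hx
    rw [modsLoopA, List.range_succ_eq_map, List.map_cons, List.map_map]
    refine List.cons_eq_cons.mpr ⟨?_, ?_⟩
    · -- head: if base > x then x else x % base  =  x.fmod base
      rw [pysem_mod_eq_fmod]
      simp only [pow_zero, mul_one]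
      split
      · exact (fmod_eq_self_of_lt (le_of_lt hx) (by omega)).symm
      · rfl
    · rw [ih (x * 10) (by positivity)]
      apply List.map_congr_left
      intro i _
      simp only [Function.comp]
      congr 1
      rw [pow_succ]
      ring

-- ===== VERDICT (by name: the statement is the Claim_ definition above) =====
theorem mods_spec : Claim_equal_mods := by
  intro base places _hdom hpre
  unfold Spec_mods
  obtain ⟨hsome, hbase⟩ := hpre
  match places with
  | none => simp at hsome
  | some n =>
    rcases hbase with hb | hn
    · rw [mods, mods_alt, modsLoopA_eq base n.toNat 1 (by norm_num)]
      apply List.map_congr_left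
      intro e _
      rw [one_mul, pow10Mod_eq e base]
    · simp only [Option.getD_some] at hn
      have : n.toNat = 0 := by omega
      rw [mods, mods_alt, this]
      simp [modsLoopA]
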